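-- pv_equiv track=rewrite | github.com/Shahd628/DSA201_2025_2026_FALL | Week01/Lecture/q1.py | findMostFreq
-- ===== SOURCE A (Python) =====
-- def findMostFreq(numbers):
--     d = {}
--     for val in numbers:
--         if val not in d:
--             d[val] = 1
--         else:
--             d[val] += 1
--
--     maxFreq = max(d.values())
--     result = []
--     for k,v in d.items():
--         if v == maxFreq:
--             result.append(k)
--
--     return min(result)
-- ===== SOURCE B (Python) =====
-- def findMostFreq(numbers):
--     counts = {}
--     for v in numbers:
--         counts[v] = counts.get(v, 0) + 1
--     best = numbers[0]
--     bc = counts[best]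
--     # single keyed argmax scan: highest count, ties broken by smallest value
--     for v, c in counts.items():
--         if c > bc or (c == bc and v < best):
--             best, bc = v, c
--     return best
-- ===== Notes on version B (the rewrite author's own statement) =====
-- stated objective: alternative
-- what changed: Replaces A's max-of-values / collect-the-tied-keys / min-of-list pipeline by a single keyed argmax scan over the count dict (highest count, ties by smallest value), so the maxFreq variable and the tie list disappear.
-- outside the precondition, e.g. on findMostFreq([]): A raises ValueError, B raises IndexError
import Mathlib
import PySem

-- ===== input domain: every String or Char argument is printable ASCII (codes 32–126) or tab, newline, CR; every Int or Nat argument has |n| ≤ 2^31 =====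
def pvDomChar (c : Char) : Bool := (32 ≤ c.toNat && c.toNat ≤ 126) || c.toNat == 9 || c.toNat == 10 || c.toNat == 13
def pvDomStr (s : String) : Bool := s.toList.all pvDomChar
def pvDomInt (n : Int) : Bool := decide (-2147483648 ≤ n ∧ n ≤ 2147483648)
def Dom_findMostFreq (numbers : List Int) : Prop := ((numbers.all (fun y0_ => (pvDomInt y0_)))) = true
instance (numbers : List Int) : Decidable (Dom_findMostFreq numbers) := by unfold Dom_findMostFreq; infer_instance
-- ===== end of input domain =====

-- B keeps the count dict but replaces A's max-of-values / collect-tied-keys / min-of-list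
-- pipeline by a single keyed argmax scan over it (objective: alternative, not faster).

-- ===== PORT A =====
def findMostFreq (numbers : List Int) : Int :=
  let d : PySem.Dict Int Int := numbers.foldl
    (fun d val => if d.contains val then d.modify val 0 (· + 1) else d.insert val 1)
    PySem.Dict.empty
  let maxFreq := (PySem.List.max? d.values (fun v => v)).getD 0   -- none = ValueError, excluded by Pre_
  let result := d.items.foldl (fun r kv => if kv.2 == maxFreq then r ++ [kv.1] else r) []
  (PySem.List.min? result (fun x => x)).getD 0

-- ===== PORT B =====
def findMostFreq_alt (numbers : List Int) : Int :=
  let counts : PySem.Dict Int Int :=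
    numbers.foldl (fun d v => d.insert v (d.getD v 0 + 1)) PySem.Dict.empty
  match numbers with
  | [] => 0   -- numbers[0] = IndexError, excluded by Pre_
  | x :: _ =>
    (counts.items.foldl
      (fun (st : Int × Int) kv =>
        if kv.2 > st.2 ∨ (kv.2 = st.2 ∧ kv.1 < st.1) then kv else st)
      (x, (counts.get? x).getD 0)).1   -- counts[best]: the key numbers[0] is always present

-- ===== PRECONDITION & SPEC =====
-- A raises ValueError (max of empty sequence) on []; B raises IndexError there.
def Pre_findMostFreq (numbers : List Int) : Prop := numbers ≠ []
instance (numbers : List Int) : Decidable (Pre_findMostFreq numbers) := by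
  unfold Pre_findMostFreq; infer_instance

def pvWitness_findMostFreq : List Int := [3, 1, 1, 3, 2]

def Spec_findMostFreq (numbers : List Int) (out : Int) : Prop := out = findMostFreq_alt numbers
instance (numbers : List Int) (out : Int) : Decidable (Spec_findMostFreq numbers out) := by
  unfold Spec_findMostFreq; infer_instance

-- ===== CLAIM (what is proved, stated in full; the proofs are below) =====
def Claim_equal_findMostFreq : Prop := ∀ (numbers : List Int), Dom_findMostFreq numbers →
  Pre_findMostFreq numbers → Spec_findMostFreq numbers (findMostFreq numbers)

-- ===== LEMMAS AND PROOFS =====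

-- `Good xs a b`: a is at least as good a candidate as b (more occurrences, or equally many
-- and a ≤ b) — the linear preorder both programs maximise.
def Good (xs : List Int) (a b : Int) : Prop :=
  xs.count b < xs.count a ∨ (xs.count a = xs.count b ∧ a ≤ b)

theorem good_refl (xs : List Int) (a : Int) : Good xs a a := Or.inr ⟨rfl, le_refl _⟩

theorem good_trans {xs : List Int} {a b c : Int} (h1 : Good xs a b) (h2 : Good xs b c) :
    Good xs a c := by
  rcases h1 with h1 | ⟨h1, h1'⟩ <;> rcases h2 with h2 | ⟨h2, h2'⟩
  · exact Or.inl (lt_trans h2 h1)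
  · exact Or.inl (h2 ▸ h1)
  · exact Or.inl (h1 ▸ h2)
  · exact Or.inr ⟨h1.trans h2, h1'.trans h2'⟩

theorem good_antisymm {xs : List Int} {a b : Int} (h1 : Good xs a b) (h2 : Good xs b a) :
    a = b := by
  rcases h1 with h1 | ⟨_, h1'⟩ <;> rcases h2 with h2 | ⟨_, h2'⟩ <;> omega

-- B's argmax scan over a list of (value, its count) pairs: invariant of the fold
theorem foldB_spec (xs : List Int) (l : List (Int × Int)) (st : Int × Int)
    (hl : ∀ kv ∈ l, kv.2 = (List.count kv.1 xs : Int))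
    (hst : st.2 = (List.count st.1 xs : Int)) :
    ((l.foldl (fun (st : Int × Int) kv =>
        if kv.2 > st.2 ∨ (kv.2 = st.2 ∧ kv.1 < st.1) then kv else st) st).1 = st.1 ∨
      (l.foldl (fun (st : Int × Int) kv =>
        if kv.2 > st.2 ∨ (kv.2 = st.2 ∧ kv.1 < st.1) then kv else st) st).1 ∈ l.map Prod.fst) ∧
    Good xs (l.foldl (fun (st : Int × Int) kv =>
        if kv.2 > st.2 ∨ (kv.2 = st.2 ∧ kv.1 < st.1) then kv else st) st).1 st.1 ∧
    (∀ kv ∈ l, Good xs (l.foldl (fun (st : Int × Int) kv =>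
        if kv.2 > st.2 ∨ (kv.2 = st.2 ∧ kv.1 < st.1) then kv else st) st).1 kv.1) := by
  induction l generalizing st with
  | nil => exact ⟨Or.inl rfl, good_refl _ _, by simp⟩
  | cons kv t ih =>
    simp only [List.foldl_cons]
    have hkv : kv.2 = (List.count kv.1 xs : Int) := hl kv List.mem_cons_self
    set st' := (if kv.2 > st.2 ∨ (kv.2 = st.2 ∧ kv.1 < st.1) then kv else st) with hst'
    have hst'c : st'.2 = (List.count st'.1 xs : Int) := by
      rw [hst']; split_ifs <;> [exact hkv; exact hst]
    have hgold : Good xs st'.1 st.1 ∧ Good xs st'.1 kv.1 := by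
      rw [hst']; split_ifs with hc
      · exact ⟨by unfold Good; omega, good_refl _ _⟩
      · exact ⟨good_refl _ _, by unfold Good; omega⟩
    obtain ⟨hmem, hgb, hall⟩ := ih st' (fun p hp => hl p (List.mem_cons_of_mem _ hp)) hst'c
    refine ⟨?_, good_trans hgb hgold.1, ?_⟩
    · rcases hmem with h | h
      · rw [h, hst']; split_ifs with hc
        · exact Or.inr (by simp)
        · exact Or.inl rfl
      · exact Or.inr (List.mem_cons_of_mem _ h)
    · intro p hp
      rcases List.mem_cons.1 hp with h | h
      · exact good_trans hgb (h ▸ hgold.2)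
      · exact hall p h

theorem countsB_eq (numbers : List Int) :
    numbers.foldl (fun d v => d.insert v (d.getD v 0 + 1)) PySem.Dict.empty
      = PySem.Dict.counter numbers :=
  PySem.Dict.foldl_insert_getD_add_one_eq_counter numbers

theorem altB_good (numbers : List Int) (h : numbers ≠ []) :
    findMostFreq_alt numbers ∈ numbers ∧
      ∀ y ∈ numbers, Good numbers (findMostFreq_alt numbers) y := by
  match numbers with
  | [] => exact absurd rfl h
  | x :: t =>
    unfold findMostFreq_alt
    simp only []
    rw [countsB_eq]
    have hl : ∀ kv ∈ (PySem.Dict.counter (x :: t)).items,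
        kv.2 = (List.count kv.1 (x :: t) : Int) := by
      intro kv hkv
      rw [PySem.Dict.items_counter] at hkv
      obtain ⟨k, _, hk2⟩ := List.mem_map.1 hkv
      rw [← hk2]
    have hst : ((x, ((PySem.Dict.counter (x :: t)).get? x).getD 0) : Int × Int).2
        = (List.count (((x, ((PySem.Dict.counter (x :: t)).get? x).getD 0) : Int × Int)).1 (x :: t) : Int) := by
      simp only []
      rw [← PySem.Dict.getD_eq_get?_getD, PySem.Dict.getD_counter]
    obtain ⟨hmem, _, hall⟩ := foldB_spec (x :: t) (PySem.Dict.counter (x :: t)).items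
      (x, ((PySem.Dict.counter (x :: t)).get? x).getD 0) hl hst
    constructor
    · rcases hmem with hm | hm
      · rw [hm]; exact List.mem_cons_self
      · have hm' : (List.foldl
            (fun (st : Int × Int) kv =>
              if kv.2 > st.2 ∨ (kv.2 = st.2 ∧ kv.1 < st.1) then kv else st)
            (x, ((PySem.Dict.counter (x :: t)).get? x).getD 0)
            (PySem.Dict.counter (x :: t)).items).1 ∈ (PySem.Dict.counter (x :: t)).keys := hm
        rw [PySem.Dict.keys_counter] at hm'
        exact (PySem.Set.mem_ofList _ _).1 hm'
    · intro y hy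
      have hyS : y ∈ PySem.Set.ofList (x :: t) := (PySem.Set.mem_ofList _ _).2 hy
      have : ((y, (List.count y (x :: t) : Int)) : Int × Int)
          ∈ (PySem.Dict.counter (x :: t)).items := by
        rw [PySem.Dict.items_counter]
        exact List.mem_map_of_mem hyS
      exact hall _ this

-- A's counting loop is Counter(numbers)
theorem foldA_counter (numbers : List Int) :
    numbers.foldl
      (fun d val => if d.contains val then d.modify val 0 (· + 1) else d.insert val 1)
      PySem.Dict.empty = PySem.Dict.counter numbers := by
  have hstep : (fun (d : PySem.Dict Int Int) val =>
      if d.contains val then d.modify val 0 (· + 1) else d.insert val 1)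
      = fun d val => d.modify val 0 (· + 1) := by
    funext d val
    by_cases h : d.contains val
    · simp [h]
    · have h0 : d.getD val 0 = 0 := PySem.Dict.getD_of_not_contains d 0 (by simpa using h)
      simp [h, PySem.Dict.modify, h0]
  rw [hstep, PySem.Dict.counter_eq_foldl]

-- A's result is Good w.r.t. every element
theorem resultA (numbers : List Int) (M : Int) :
    List.foldl (fun r kv => if kv.2 == M then r ++ [kv.1] else r) []
      (PySem.Dict.counter numbers).items
    = (PySem.Set.ofList numbers).filter (fun k => ((List.count k numbers : Int) == M)) := by
  rw [PySem.Dict.items_counter]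
  refine (PySem.List.foldl_append_if (fun kv : Int × Int => kv.2 == M) (fun kv : Int × Int => kv.1) _ []).trans ?_
  simp [List.filter_map, Function.comp_def]

theorem vals_counter (numbers : List Int) :
    (PySem.Dict.counter numbers).values
      = (PySem.Set.ofList numbers).map (fun k => ((List.count k numbers : Int))) := by
  simp [PySem.Dict.values, PySem.Dict.items_counter, List.map_map, Function.comp_def]

theorem altA_good (numbers : List Int) (h : numbers ≠ []) :
    findMostFreq numbers ∈ numbers ∧
      ∀ y ∈ numbers, Good numbers (findMostFreq numbers) y := by
  unfold findMostFreq
  simp only []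
  rw [foldA_counter]
  rcases hM : PySem.List.max? (PySem.Dict.counter numbers).values (fun v => v) with _ | M
  · exfalso
    rw [PySem.List.max?_eq_none_iff, vals_counter] at hM
    cases hn : numbers with
    | nil => exact h hn
    | cons a t =>
      have ha : a ∈ PySem.Set.ofList numbers :=
        (PySem.Set.mem_ofList _ _).2 (by rw [hn]; exact List.mem_cons_self)
      have := List.mem_map_of_mem (f := fun k => ((List.count k numbers : Int))) ha
      rw [hM] at this
      simp at this
  · rw [show ((some M).getD 0 : Int) = M from rfl, resultA numbers M]
    have hmax := PySem.List.max?_isMax hM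
    have hMv := PySem.List.max?_mem hM
    rw [vals_counter] at hMv
    obtain ⟨k, hk, hkM⟩ := List.mem_map.1 hMv
    rcases hm : PySem.List.min?
        ((PySem.Set.ofList numbers).filter fun k => ((List.count k numbers : Int) == M))
        (fun x => x) with _ | m
    · exfalso
      rw [PySem.List.min?_eq_none_iff] at hm
      have : k ∈ (PySem.Set.ofList numbers).filter
          (fun k => ((List.count k numbers : Int) == M)) :=
        List.mem_filter.2 ⟨hk, by simp [hkM]⟩
      rw [hm] at this
      simp at this
    · rw [show ((some m).getD 0 : Int) = m from rfl]
      have hmmem := PySem.List.min?_mem hm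
      have hmin := PySem.List.min?_isMin hm
      obtain ⟨hmS, hmM⟩ := List.mem_filter.1 hmmem
      have hmcount : (List.count m numbers : Int) = M := by simpa using hmM
      refine ⟨(PySem.Set.mem_ofList _ _).1 hmS, ?_⟩
      intro y hy
      have hyS : y ∈ PySem.Set.ofList numbers := (PySem.Set.mem_ofList _ _).2 hy
      have hyle : ((List.count y numbers : Int)) ≤ M := by
        have hyv := List.mem_map_of_mem (f := fun k => ((List.count k numbers : Int))) hyS
        rw [← vals_counter] at hyv
        exact hmax _ hyv
      by_cases hc : List.count y numbers = List.count m numbers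
      · refine Or.inr ⟨hc.symm, ?_⟩
        have hyF : y ∈ (PySem.Set.ofList numbers).filter
            (fun k => ((List.count k numbers : Int) == M)) :=
          List.mem_filter.2 ⟨hyS, by simp [hc, hmcount]⟩
        exact hmin y hyF
      · exact Or.inl (by omega)

-- ===== VERDICT (by name: the statement is the Claim_ definition above) =====
theorem findMostFreq_spec : Claim_equal_findMostFreq := by
  intro numbers _ hpre
  unfold Spec_findMostFreq
  obtain ⟨hA, hAall⟩ := altA_good numbers hpre
  obtain ⟨hB, hBall⟩ := altB_good numbers hpre
  exact good_antisymm (hAall _ hB) (hBall _ hA)
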